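-- pv_equiv track=rewrite | github.com/miliar/Code_Jam_Webscraper | Solutions_python/Problem_138/1125.py | getDecentScore
-- ===== SOURCE A (Python) =====
-- def getKenMove(naomi, kenBlocks):
--     # fast check if we can choose a heavier block than naomi
--     if kenBlocks[-1] > naomi:
--         # find that slightly heavier one
--         for block in kenBlocks:
--             if block > naomi:
--                 move = block
--                 break
--     else:
--         # we don't have a heavier block, choose lightest
--         move = kenBlocks[0]
--     kenBlocks.remove(move)
--     return move
--
-- def getDecentScore(naomiBlocks, kenBlocks):
--     score = 0
--     while naomiBlocks:
--         naomi = naomiBlocks.pop(-1)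
--         ken = getKenMove(naomi, kenBlocks)
--         if naomi > ken:
--             score += 1
--     return score
-- ===== SOURCE B (Python) =====
-- def getDecentScore(naomiBlocks, kenBlocks):
--     # Non-mutating re-implementation: Ken's remaining blocks are tracked with a
--     # boolean "used" array over the original list plus lo/hi pointers to his
--     # lightest-position/last-position unused blocks, instead of A's list
--     # mutation via .pop/.remove. (A mutates both argument lists; B mutates neither.)
--     kb = kenBlocks
--     n = len(kb)
--     used = [False] * n
--     lo, hi = 0, n - 1
--     score = 0
--     for naomi in reversed(naomiBlocks):
--         if kb[hi] > naomi:
--             # Ken over-tops: take his first still-available block heavier than naomi.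
--             j = lo
--             while used[j] or kb[j] <= naomi:
--                 j += 1
--         else:
--             # Ken sacrifices his first available block; Naomi scores iff heavier.
--             if naomi > kb[lo]:
--                 score += 1
--             j = lo
--         used[j] = True
--         while lo < n and used[lo]:
--             lo += 1
--         while hi >= 0 and used[hi]:
--             hi -= 1
--     return score
-- ===== Notes on version B (the rewrite author's own statement) =====
-- stated objective: alternative
-- what changed: B replaces A's destructive list simulation (pop(-1) plus a helper doing a last-element peek, a value scan and .remove per round) with a non-mutating index sweep: a boolean used-array over the original kenBlocks plus lo/hi pointers maintained to Ken's first and last still-available blocks.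
import Mathlib
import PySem

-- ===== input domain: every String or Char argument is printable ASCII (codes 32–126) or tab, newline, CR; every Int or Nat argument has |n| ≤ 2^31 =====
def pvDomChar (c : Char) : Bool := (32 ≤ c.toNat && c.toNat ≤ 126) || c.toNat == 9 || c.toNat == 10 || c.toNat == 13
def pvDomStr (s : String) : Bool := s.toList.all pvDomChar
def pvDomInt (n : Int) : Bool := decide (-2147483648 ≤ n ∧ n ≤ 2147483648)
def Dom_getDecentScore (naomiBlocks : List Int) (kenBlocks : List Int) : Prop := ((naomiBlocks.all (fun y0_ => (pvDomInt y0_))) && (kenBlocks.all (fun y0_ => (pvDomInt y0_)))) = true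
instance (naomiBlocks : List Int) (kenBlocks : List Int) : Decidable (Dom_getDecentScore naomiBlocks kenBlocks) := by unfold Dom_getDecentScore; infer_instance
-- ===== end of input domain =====

-- B replaces A's destructive list simulation with a non-mutating used-array + lo/hi pointer
-- sweep over the original kenBlocks (same cost class); the equivalence is about the RETURN
-- value only: Python A mutates both argument lists, B mutates neither.

-- ===== PORT A =====
-- 'for block in kenBlocks: if block > naomi: move = block; break' — loop with break
def pvFindGt (naomi : Int) : List Int → Option Int
  | [] => none
  | b :: rest => if b > naomi then some b else pvFindGt naomi rest

-- getKenMove: returns (move, kenBlocks after .remove(move)); none = Python raises (empty list)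
def pvGetKenMove (naomi : Int) (kenBlocks : List Int) : Option (Int × List Int) :=
  match PySem.List.pyGet? kenBlocks (-1) with
  | none => none            -- IndexError: kenBlocks[-1] on empty list
  | some last =>
    match (if last > naomi then pvFindGt naomi kenBlocks else PySem.List.pyGet? kenBlocks 0) with
    | none => none
    | some move =>
      match PySem.List.remove? kenBlocks move with
      | none => none
      | some ken' => some (move, ken')

-- the while loop: naomiBlocks.pop(-1) processes naomiBlocks from the back,
-- so we recurse over naomiBlocks.reverse
def pvScoreLoopA : List Int → List Int → Int → Int
  | [], _, score => score
  | naomi :: rest, ken, score =>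
    match pvGetKenMove naomi ken with
    | none => score         -- Python raises here; outside Pre_
    | some (kenMove, ken') =>
      pvScoreLoopA rest ken' (if naomi > kenMove then score + 1 else score)

def getDecentScore (naomiBlocks : List Int) (kenBlocks : List Int) : Int :=
  pvScoreLoopA naomiBlocks.reverse kenBlocks 0

-- ===== PORT B =====
-- 'while j < n and cont(j): j += 1' (the j-scan of the over-top branch and the lo-advance;
-- the bound n is Python's IndexError boundary: inside Pre_ the scans stop before it)
def pvWhileInc (n : Nat) (cont : Nat → Bool) (j : Nat) : Nat :=
  if h : j < n ∧ cont j = true then pvWhileInc n cont (j + 1) else j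
termination_by n - j
decreasing_by omega

-- 'while hi >= 0 and used[hi]: hi -= 1'
def pvWhileDec (used : List Bool) (hi : Int) : Int :=
  if h : 0 ≤ hi ∧ used.getD hi.toNat false = true then pvWhileDec used (hi - 1) else hi
termination_by (hi + 1).toNat
decreasing_by omega

-- the 'for naomi in reversed(naomiBlocks)' body; state = (used, lo, hi, score);
-- pyGet? none = Python's IndexError (outside Pre_)
def pvLoopB (kb : List Int) : List Int → List Bool → Nat → Int → Int → Int
  | [], _, _, _, score => score
  | naomi :: rest, used, lo, hi, score =>
    match PySem.List.pyGet? kb hi with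
    | none => score
    | some khi =>
      if naomi < khi then
        let j := pvWhileInc kb.length (fun i => used.getD i false || decide (kb.getD i 0 ≤ naomi)) lo
        let used' := used.set j true
        pvLoopB kb rest used' (pvWhileInc kb.length (fun i => used'.getD i false) lo)
          (pvWhileDec used' hi) score
      else
        match PySem.List.pyGet? kb (lo : Int) with
        | none => score
        | some klo =>
          let used' := used.set lo true
          pvLoopB kb rest used' (pvWhileInc kb.length (fun i => used'.getD i false) lo)
            (pvWhileDec used' hi) (if naomi > klo then score + 1 else score)

def getDecentScore_alt (naomiBlocks : List Int) (kenBlocks : List Int) : Int :=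
  pvLoopB kenBlocks naomiBlocks.reverse (List.replicate kenBlocks.length false) 0
    ((kenBlocks.length : Int) - 1) 0

-- ===== PRECONDITION & SPEC =====
-- Python A raises IndexError (kenBlocks[-1] on the emptied list) exactly when Ken has
-- fewer blocks than Naomi; each round consumes one Ken block.
def Pre_getDecentScore (naomiBlocks : List Int) (kenBlocks : List Int) : Prop :=
  naomiBlocks.length ≤ kenBlocks.length
instance (naomiBlocks : List Int) (kenBlocks : List Int) : Decidable (Pre_getDecentScore naomiBlocks kenBlocks) := by unfold Pre_getDecentScore; infer_instance
def pvWitness_getDecentScore : List Int × List Int := ([1, 3], [2, 4])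

def Spec_getDecentScore (naomiBlocks : List Int) (kenBlocks : List Int) (out : Int) : Prop := out = getDecentScore_alt naomiBlocks kenBlocks
instance (naomiBlocks : List Int) (kenBlocks : List Int) (out : Int) : Decidable (Spec_getDecentScore naomiBlocks kenBlocks out) := by unfold Spec_getDecentScore; infer_instance

-- ===== CLAIM (what is proved, stated in full; the proofs are below) =====
def Claim_equal_getDecentScore : Prop := ∀ (naomiBlocks : List Int) (kenBlocks : List Int), Dom_getDecentScore naomiBlocks kenBlocks → Pre_getDecentScore naomiBlocks kenBlocks → Spec_getDecentScore naomiBlocks kenBlocks (getDecentScore naomiBlocks kenBlocks)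

-- ===== LEMMAS AND PROOFS =====

-- head of a strictly increasing list is its minimum
lemma pvHeadMin {a x : Nat} {t : List Nat} (hpw : (a :: t).Pairwise (· < ·))
    (hx : x ∈ a :: t) : a ≤ x := by
  rcases List.mem_cons.mp hx with rfl | hx
  · exact le_rfl
  · exact le_of_lt ((List.pairwise_cons.mp hpw).1 x hx)

-- last of a strictly increasing list is its maximum
lemma pvLastMax {m x : Nat} {l : List Nat} (hpw : l.Pairwise (· < ·))
    (hl : l.getLast? = some m) (hx : x ∈ l) : x ≤ m := by
  obtain ⟨ys, rfl⟩ := List.getLast?_eq_some_iff.mp hl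
  rcases List.mem_append.mp hx with hx | hx
  · exact le_of_lt ((List.pairwise_append.mp hpw).2.2 x hx m (by simp))
  · simp_all

-- ascending while-loop characterisation
lemma pvWhileInc_eq (n : Nat) (cont : Nat → Bool) (k : Nat) (hkn : k < n)
    (hck : cont k = false) :
    ∀ j, j ≤ k → (∀ i, j ≤ i → i < k → cont i = true) → pvWhileInc n cont j = k := by
  intro j hj hall
  induction hfuel : k - j generalizing j with
  | zero =>
    have : j = k := by omega
    subst this
    rw [pvWhileInc]
    simp [hck]
  | succ d ih =>
    have hjk : j < k := by omega
    have hcj : cont j = true := hall j le_rfl hjk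
    rw [pvWhileInc]
    simp only [hcj, and_true, show j < n by omega, dite_true]
    exact ih (j + 1) (by omega) (fun i h1 h2 => hall i (by omega) h2) (by omega)

-- descending while-loop characterisation
lemma pvWhileDec_eq (used : List Bool) (k : Int) (hk0 : 0 ≤ k)
    (hck : used.getD k.toNat false = false) :
    ∀ hi, k ≤ hi → (∀ i : Int, k < i → i ≤ hi → used.getD i.toNat false = true) →
      pvWhileDec used hi = k := by
  intro hi hk hall
  induction hfuel : (hi - k).toNat generalizing hi with
  | zero =>
    have : hi = k := by omega
    subst this
    have hcond : ¬ ((0:Int) ≤ hi ∧ used.getD hi.toNat false = true) :=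
      fun hc => by rw [hck] at hc; exact Bool.false_ne_true hc.2
    rw [pvWhileDec, dif_neg hcond]
  | succ d ih =>
    have hkh : k < hi := by omega
    have hch : used.getD hi.toNat false = true := hall hi hkh le_rfl
    rw [pvWhileDec]
    simp only [hch, and_true, show (0:Int) ≤ hi by omega, dite_true]
    exact ih (hi - 1) (by omega) (fun i h1 h2 => hall i h1 (by omega)) (by omega)

-- A's break-loop on a decomposed list
lemma pvFindGt_append (naomi : Int) (pre : List Int) (j : Int) (post : List Int)
    (hpre : ∀ x ∈ pre, x ≤ naomi) (hj : naomi < j) :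
    pvFindGt naomi (pre ++ j :: post) = some j := by
  induction pre with
  | nil => simp [pvFindGt, hj]
  | cons x xs ih =>
    simp only [List.cons_append, pvFindGt]
    rw [if_neg (not_lt.mpr (hpre x (by simp)))]
    exact ih (fun y hy => hpre y (List.mem_cons_of_mem _ hy))

-- .remove(v) on a list whose prefix cannot contain v
lemma pvRemove_append (v : Int) (pre : List Int) (post : List Int) (h : v ∉ pre) :
    PySem.List.remove? (pre ++ v :: post) v = some (pre ++ post) := by
  induction pre with
  | nil => simp
  | cons x xs ih =>
    have hx : x ≠ v := fun e => h (by simp [e])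
    rw [List.cons_append, PySem.List.remove?_cons_of_ne _ hx,
      ih (fun hv => h (by simp [hv]))]
    rfl

-- getD / set bookkeeping
lemma pvGetD_set_self (used : List Bool) (j : Nat) (h : j < used.length) :
    (used.set j true).getD j false = true := by
  simp [List.getD_eq_getElem?_getD, List.getElem?_set_self h]

lemma pvGetD_set_ne (used : List Bool) (i j : Nat) (h : i ≠ j) :
    (used.set j true).getD i false = used.getD i false := by
  simp [List.getD_eq_getElem?_getD, List.getElem?_set_ne (Ne.symm h)]

-- the lo-advance lands on the least available index
lemma pvSkipToHead (n : Nat) (used' : List Bool) (avail' : List Nat) (q : Nat)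
    (hchar' : ∀ i, i < n → (used'.getD i false = false ↔ i ∈ avail'))
    (hq : used'.getD q false = false) (hqn : q < n) (hmin : ∀ x ∈ avail', q ≤ x)
    (lo : Nat) (hloq : lo ≤ q) :
    pvWhileInc n (fun i => used'.getD i false) lo = q := by
  apply pvWhileInc_eq n _ q hqn hq lo hloq
  intro i h1 h2
  cases h' : used'.getD i false with
  | true => rfl
  | false =>
    have := hmin i ((hchar' i (lt_trans h2 hqn)).mp h')
    omega

-- the hi-retreat lands on the greatest available index
lemma pvSkipToLast (used' : List Bool) (n : Nat) (avail' : List Nat) (k : Nat)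
    (hchar' : ∀ i, i < n → (used'.getD i false = false ↔ i ∈ avail'))
    (hk : used'.getD k false = false) (hmax : ∀ x ∈ avail', x ≤ k)
    (hi : Int) (hkhi : (k : Int) ≤ hi) (hhin : hi < (n : Int)) :
    pvWhileDec used' hi = (k : Int) := by
  apply pvWhileDec_eq used' (k : Int) (Int.natCast_nonneg k) (by simpa using hk) hi hkhi
  intro i h1 h2
  cases h' : used'.getD i.toNat false with
  | true => rfl
  | false =>
    have hin : i.toNat < n := by omega
    have := hmax i.toNat ((hchar' i.toNat hin).mp h')
    omega

lemma pvGetLastMem {l : List Nat} {k : Nat} (h : l.getLast? = some k) : k ∈ l := by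
  obtain ⟨ys, rfl⟩ := List.getLast?_eq_some_iff.mp h; simp

-- the main simulation invariant: A's remaining ken list is the unused-indexed sublist,
-- lo/hi are its first/last indices
lemma pvMain (kb : List Int) (naomis : List Int) :
    ∀ (avail : List Nat) (used : List Bool) (lo : Nat) (hi : Int) (score : Int),
      used.length = kb.length →
      avail.Pairwise (· < ·) →
      (∀ i ∈ avail, i < kb.length) →
      (∀ i, i < kb.length → (used.getD i false = false ↔ i ∈ avail)) →
      naomis.length ≤ avail.length →
      (avail ≠ [] → avail.head? = some lo ∧ ∃ k, avail.getLast? = some k ∧ hi = (k : Int)) →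
      pvScoreLoopA naomis (avail.map (fun i => kb.getD i 0)) score =
        pvLoopB kb naomis used lo hi score := by
  induction naomis with
  | nil => intro avail used lo hi score _ _ _ _ _ _; rfl
  | cons naomi rest ih =>
    intro avail used lo hi score hlen hpw hbnd hchar hcnt hends
    cases avail with
    | nil => simp at hcnt
    | cons a t =>
      obtain ⟨hlo, m, hlast, hhi⟩ := hends (by simp)
      obtain rfl : a = lo := by simpa using hlo
      subst hhi
      have hmmem : m ∈ a :: t := pvGetLastMem hlast
      have hmlen : m < kb.length := hbnd m hmmem
      have hmge : ∀ x ∈ a :: t, x ≤ m := fun x hx => pvLastMax hpw hlast hx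
      have hamin : ∀ x ∈ a :: t, a ≤ x := fun x hx => pvHeadMin hpw hx
      have halen : a < kb.length := hbnd a (by simp)
      have hkenlast : PySem.List.pyGet? ((a :: t).map (fun i => kb.getD i 0)) (-1)
          = some (kb.getD m 0) := by
        rw [PySem.List.pyGet?_neg_one, List.getLast?_map, hlast]; rfl
      have hkb_hi : PySem.List.pyGet? kb ((m : Nat) : Int) = some (kb.getD m 0) := by
        rw [PySem.List.pyGet?_eq_some_getElem kb (Int.natCast_nonneg m) (by exact_mod_cast hmlen)]
        simp [List.getD_eq_getElem?_getD, List.getElem?_eq_getElem hmlen]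
      by_cases hcase : naomi < kb.getD m 0
      · -- over-top branch
        cases hdrop : (a :: t).dropWhile (fun i => decide (kb.getD i 0 ≤ naomi)) with
        | nil =>
          exact absurd (by simpa using List.dropWhile_eq_nil_iff.mp hdrop m hmmem)
            (not_le.mpr hcase)
        | cons j post =>
          set P : Nat → Bool := fun i => decide (kb.getD i 0 ≤ naomi) with hP
          set pre := (a :: t).takeWhile P with hpre_def
          have hsplit : a :: t = pre ++ j :: post := by
            rw [hpre_def, ← hdrop, List.takeWhile_append_dropWhile]
          have hPj : naomi < kb.getD j 0 := by
            have hw : List.dropWhile P (a :: t) ≠ [] := by rw [hdrop]; simp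
            have h1 := List.head_dropWhile_not P hw
            simp only [hdrop, List.head_cons] at h1
            simpa [hP] using h1
          have hpreP : ∀ x ∈ pre, kb.getD x 0 ≤ naomi := fun x hx => by
            have h1 := List.mem_takeWhile_imp (hpre_def ▸ hx)
            simp only [hP, decide_eq_true_eq] at h1
            exact h1
          have hpw2 : (pre ++ j :: post).Pairwise (· < ·) := hsplit ▸ hpw
          obtain ⟨hpwpre, hpwjp, hcross⟩ := List.pairwise_append.mp hpw2
          have hjpost : ∀ x ∈ post, j < x := (List.pairwise_cons.mp hpwjp).1
          have hprelt : ∀ x ∈ pre, x < j := fun x hx => hcross x hx j (by simp)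
          have hjmem : j ∈ a :: t := by rw [hsplit]; simp
          have hjlen : j < kb.length := hbnd j hjmem
          have hjun : used.getD j false = false := (hchar j hjlen).mpr hjmem
          have hsub : ∀ x ∈ pre ++ post, x ∈ a :: t := by
            intro x hx; rw [hsplit]
            rcases List.mem_append.mp hx with h | h
            · exact List.mem_append.mpr (Or.inl h)
            · exact List.mem_append.mpr (Or.inr (by simp [h]))
          have hken : (a :: t).map (fun i => kb.getD i 0)
              = pre.map (fun i => kb.getD i 0) ++ kb.getD j 0 :: post.map (fun i => kb.getD i 0) := by
            rw [hsplit]; simp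
          have hfind : pvFindGt naomi ((a :: t).map (fun i => kb.getD i 0)) = some (kb.getD j 0) := by
            rw [hken]
            exact pvFindGt_append _ _ _ _
              (fun x hx => by obtain ⟨y, hy, rfl⟩ := List.mem_map.mp hx; exact hpreP y hy) hPj
          have hrem : PySem.List.remove? ((a :: t).map (fun i => kb.getD i 0)) (kb.getD j 0)
              = some ((pre ++ post).map (fun i => kb.getD i 0)) := by
            rw [hken, pvRemove_append _ _ _ ?_]
            · simp
            · intro hx
              obtain ⟨y, hy, he⟩ := List.mem_map.mp hx
              have := hpreP y hy
              omega
          -- A's step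
          have hA : pvScoreLoopA (naomi :: rest) ((a :: t).map (fun i => kb.getD i 0)) score
              = pvScoreLoopA rest ((pre ++ post).map (fun i => kb.getD i 0)) score := by
            simp only [pvScoreLoopA, pvGetKenMove, hkenlast, if_pos hcase, hfind, hrem]
            rw [if_neg (by omega)]
          -- B's j-scan lands on j
          have hj' : pvWhileInc kb.length
              (fun i => used.getD i false || decide (kb.getD i 0 ≤ naomi)) a = j := by
            apply pvWhileInc_eq _ _ j hjlen
              (by simp only [hjun, Bool.false_or, decide_eq_false_iff_not, not_le]; exact hPj)
              a (hamin j hjmem)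
            intro i h1 h2
            cases hu : used.getD i false with
            | true => simp only [Bool.true_or]
            | false =>
              have hiav : i ∈ a :: t := (hchar i (by omega)).mp hu
              have hipre : i ∈ pre := by
                rw [hsplit] at hiav
                rcases List.mem_append.mp hiav with h | h
                · exact h
                · rcases List.mem_cons.mp h with rfl | h
                  · omega
                  · exact absurd (hjpost i h) (by omega)
              simp only [Bool.false_or, decide_eq_true_eq]
              exact hpreP i hipre
          have hchar' : ∀ i, i < kb.length →
              ((used.set j true).getD i false = false ↔ i ∈ pre ++ post) := by
            intro i hi'
            by_cases hij : i = j
            · subst hij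
              rw [pvGetD_set_self used i (hlen ▸ hjlen)]
              have hnj : i ∉ pre ++ post := by
                intro hmem
                rcases List.mem_append.mp hmem with h | h
                · exact absurd (hprelt i h) (lt_irrefl i)
                · exact absurd (hjpost i h) (lt_irrefl i)
              simp [hnj]
            · rw [pvGetD_set_ne used i j hij, hchar i hi', hsplit]
              simp [hij]
          have hpw'' : (pre ++ post).Pairwise (· < ·) :=
            List.pairwise_append.mpr ⟨hpwpre, (List.pairwise_cons.mp hpwjp).2,
              fun x hx y hy => hcross x hx y (by simp [hy])⟩
          have hcnt' : rest.length ≤ (pre ++ post).length := by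
            have hl : (a :: t).length = (pre ++ j :: post).length := by rw [hsplit]
            simp only [List.length_cons, List.length_append] at hcnt hl ⊢
            omega
          -- B's step + IH
          rw [hA, ih (pre ++ post) (used.set j true)
            (pvWhileInc kb.length (fun i => (used.set j true).getD i false) a)
            (pvWhileDec (used.set j true) ((m : Nat) : Int)) score (by simp [hlen]) hpw''
            (fun i hi' => hbnd i (hsub i hi')) hchar' hcnt' ?_]
          · simp only [pvLoopB, hkb_hi, if_pos hcase, hj']
          · -- new ends
            intro hne
            obtain ⟨q, tl, hav⟩ : ∃ q tl, pre ++ post = q :: tl := by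
              cases h' : pre ++ post with
              | nil => exact absurd h' hne
              | cons q tl => exact ⟨q, tl, rfl⟩
            have hqmem : q ∈ pre ++ post := by rw [hav]; simp
            have hqun : (used.set j true).getD q false = false :=
              (hchar' q (hbnd q (hsub q hqmem))).mpr hqmem
            obtain ⟨k, hk⟩ : ∃ k, (pre ++ post).getLast? = some k := by
              rw [hav]; exact ⟨(q :: tl).getLast (by simp), List.getLast?_eq_some_iff.mpr
                ⟨(q :: tl).dropLast, (List.dropLast_concat_getLast (by simp)).symm⟩⟩
            have hkmem : k ∈ pre ++ post := pvGetLastMem hk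
            have hkun : (used.set j true).getD k false = false :=
              (hchar' k (hbnd k (hsub k hkmem))).mpr hkmem
            refine ⟨?_, k, hk, ?_⟩
            · rw [pvSkipToHead kb.length _ (pre ++ post) q hchar' hqun
                (hbnd q (hsub q hqmem))
                (fun x hx => pvHeadMin (hav ▸ hpw'') (hav ▸ hx)) a (hamin q (hsub q hqmem)),
                hav]
              rfl
            · exact pvSkipToLast _ kb.length (pre ++ post) k hchar' hkun
                (fun x hx => pvLastMax hpw'' hk hx) _ (by exact_mod_cast hmge k (hsub k hkmem))
                (by exact_mod_cast hmlen)
      · -- sacrifice branch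
        have hA : pvScoreLoopA (naomi :: rest) ((a :: t).map (fun i => kb.getD i 0)) score
            = pvScoreLoopA rest (t.map (fun i => kb.getD i 0))
              (if naomi > kb.getD a 0 then score + 1 else score) := by
          have hkenlast' : PySem.List.pyGet?
              (kb.getD a 0 :: t.map (fun i => kb.getD i 0)) (-1) = some (kb.getD m 0) := by
            exact hkenlast
          simp only [pvScoreLoopA, pvGetKenMove, gt_iff_lt, List.map_cons, hkenlast',
            if_neg hcase, PySem.List.pyGet?_zero_cons, PySem.List.remove?_cons_self]
        have hkb_lo : PySem.List.pyGet? kb ((a : Nat) : Int) = some (kb.getD a 0) := by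
          rw [PySem.List.pyGet?_eq_some_getElem kb (Int.natCast_nonneg a) (by exact_mod_cast halen)]
          simp [List.getD_eq_getElem?_getD, List.getElem?_eq_getElem halen]
        have hanott : a ∉ t := fun h => absurd ((List.pairwise_cons.mp hpw).1 a h) (lt_irrefl a)
        have hchar' : ∀ i, i < kb.length →
            ((used.set a true).getD i false = false ↔ i ∈ t) := by
          intro i hi'
          by_cases hia : i = a
          · subst hia
            rw [pvGetD_set_self used i (hlen ▸ hi')]
            simp [hanott]
          · rw [pvGetD_set_ne used i a hia, hchar i hi']
            simp [hia]
        have hpw'' : t.Pairwise (· < ·) := (List.pairwise_cons.mp hpw).2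
        rw [hA, ih t (used.set a true)
          (pvWhileInc kb.length (fun i => (used.set a true).getD i false) a)
          (pvWhileDec (used.set a true) ((m : Nat) : Int))
          (if naomi > kb.getD a 0 then score + 1 else score) (by simp [hlen]) hpw''
          (fun i hi' => hbnd i (by simp [hi'])) hchar' (by simpa using hcnt) ?_]
        · simp only [pvLoopB, hkb_hi, if_neg hcase, hkb_lo]
        · intro hne
          obtain ⟨q, tl, hav⟩ : ∃ q tl, t = q :: tl := by
            cases h' : t with
            | nil => exact absurd h' hne
            | cons q tl => exact ⟨q, tl, rfl⟩
          have hqmem : q ∈ t := by rw [hav]; simp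
          have hqun : (used.set a true).getD q false = false :=
            (hchar' q (hbnd q (by simp [hqmem]))).mpr hqmem
          obtain ⟨k, hk⟩ : ∃ k, t.getLast? = some k := by
            rw [hav]; exact ⟨(q :: tl).getLast (by simp), List.getLast?_eq_some_iff.mpr
              ⟨(q :: tl).dropLast, (List.dropLast_concat_getLast (by simp)).symm⟩⟩
          have hkmem : k ∈ t := pvGetLastMem hk
          have hkun : (used.set a true).getD k false = false :=
            (hchar' k (hbnd k (by simp [hkmem]))).mpr hkmem
          refine ⟨?_, k, hk, ?_⟩
          · rw [pvSkipToHead kb.length _ t q hchar' hqun (hbnd q (by simp [hqmem]))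
              (fun x hx => pvHeadMin (hav ▸ hpw'') (hav ▸ hx)) a (hamin q (by simp [hqmem])),
              hav]
            rfl
          · exact pvSkipToLast _ kb.length t k hchar' hkun
              (fun x hx => pvLastMax hpw'' hk hx) _
              (by exact_mod_cast hmge k (by simp [hkmem])) (by exact_mod_cast hmlen)

-- kb itself is the fully-available sublist
lemma pvMapRange (kb : List Int) :
    (List.range kb.length).map (fun i => kb.getD i 0) = kb := by
  apply List.ext_getElem
  · simp
  · intro i h1 h2
    simp [List.getD_eq_getElem?_getD, List.getElem?_eq_getElem h2]

lemma pvRangeLast (n : Nat) (h : 0 < n) : (List.range n).getLast? = some (n - 1) := by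
  cases n with
  | zero => omega
  | succ k => rw [List.range_succ]; simp

-- ===== VERDICT (by name: the statement is the Claim_ definition above) =====
theorem getDecentScore_spec : Claim_equal_getDecentScore := by
  intro naomiBlocks kenBlocks _ hpre
  unfold Spec_getDecentScore getDecentScore getDecentScore_alt
  have hmain := pvMain kenBlocks naomiBlocks.reverse (List.range kenBlocks.length)
    (List.replicate kenBlocks.length false) 0 ((kenBlocks.length : Int) - 1) 0
    (by simp)
    List.pairwise_lt_range
    (fun i hi' => List.mem_range.mp hi')
    (by intro i hi'; simp [List.getD_eq_getElem?_getD, hi', List.mem_range])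
    (by simpa using hpre)
    ?_
  · rw [pvMapRange kenBlocks] at hmain
    exact hmain
  · intro hne
    have hn : 0 < kenBlocks.length := by
      cases hl : kenBlocks.length with
      | zero => rw [hl] at hne; simp at hne
      | succ k => omega
    refine ⟨?_, kenBlocks.length - 1, pvRangeLast _ hn, by omega⟩
    cases hl : kenBlocks.length with
    | zero => omega
    | succ k => simp [List.range_succ_eq_map]
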